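-- pv_equiv track=rewrite | github.com/MinTreesLearn/ML | Codeforces Submissions/1293/C/119176405.py | process
-- ===== SOURCE A (Python) =====
-- def process(A, n):
--
--     q = len(A)
--
--     answer = []
--
--     d = {}
--
--     adj_count = 0
--
--     for a, b in A:
--
--         if b not in d:
--
--             d[b] = set([])
--
--         if a in d[b]:
--
--             d[b].remove(a)
--
--             for b2 in [b-1, b, b+1]:
--
--                 if b2 in d and (3-a) in d[b2]:
--
--                     adj_count-=1
--
--         else:
--
--             d[b].add(a)
--
--             for b2 in [b-1, b, b+1]:
--
--                 if b2 in d and (3-a) in d[b2]: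
--
--                     adj_count+=1
--
--         if adj_count==0:
--
--             answer.append('YES')
--
--         else:
--
--             answer.append('NO')
--
--     return answer
-- ===== SOURCE B (Python) =====
-- def process(A, n):
--     # Keep only the set of occupied cells; answer each query by a fresh
--     # rescan for a conflicting pair instead of an incremental counter.
--     occ = set()
--     answer = []
--     for a, b in A:
--         if (a, b) in occ:
--             occ.remove((a, b))
--         else:
--             occ.add((a, b))
--         bad = any((3 - a2, c) in occ
--                   for (a2, b2) in occ
--                   for c in (b2 - 1, b2, b2 + 1))
--         answer.append('NO' if bad else 'YES')
--     return answer
-- ===== Notes on version B (the rewrite author's own statement) =====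
-- stated objective: simpler
-- what changed: B drops A's dict-of-sets plus incrementally maintained adj_count and keeps only a set of occupied cells, answering each query by a fresh existence scan for a conflicting opposite-row neighbour; the per-query O(1) counter update becomes a per-query rescan, so B trades speed for a much simpler state.
import Mathlib
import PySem

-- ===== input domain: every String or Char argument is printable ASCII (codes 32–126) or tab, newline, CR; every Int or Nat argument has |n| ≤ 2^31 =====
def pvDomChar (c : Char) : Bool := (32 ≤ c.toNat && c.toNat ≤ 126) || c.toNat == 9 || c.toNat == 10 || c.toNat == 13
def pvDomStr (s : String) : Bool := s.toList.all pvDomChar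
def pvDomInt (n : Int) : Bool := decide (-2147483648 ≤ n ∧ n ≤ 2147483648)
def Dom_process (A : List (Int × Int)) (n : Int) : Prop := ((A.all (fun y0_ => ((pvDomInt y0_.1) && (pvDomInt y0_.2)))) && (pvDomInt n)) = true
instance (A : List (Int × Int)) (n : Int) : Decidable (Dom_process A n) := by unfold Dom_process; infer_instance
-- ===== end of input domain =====

-- B replaces A's incrementally maintained adjacency counter (dict column -> set of rows plus
-- adj_count) by a plain set of occupied cells with a fresh existence rescan per query: simpler state.

-- ===== PORT A =====
-- one iteration of A's loop: state = (d, adj_count, answer)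
def processStep (st : PySem.Dict Int (PySem.Set Int) × Int × List String) (ab : Int × Int) :
    PySem.Dict Int (PySem.Set Int) × Int × List String :=
  let a := ab.1
  let b := ab.2
  let d0 := st.1
  -- if b not in d: d[b] = set([])
  let d1 := if d0.contains b then d0 else d0.insert b PySem.Set.empty
  let s := d1.getD b PySem.Set.empty
  if PySem.Set.contains s a then
    -- d[b].remove(a)  (membership just checked, so Set.discard is exact here)
    let d2 := d1.insert b (PySem.Set.discard s a)
    let adj := ([b - 1, b, b + 1]).foldl (fun acc b2 =>
        if d2.contains b2 && PySem.Set.contains (d2.getD b2 PySem.Set.empty) (3 - a) then acc - 1 else acc) st.2.1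
    (d2, adj, st.2.2 ++ [if adj == 0 then "YES" else "NO"])
  else
    -- d[b].add(a)
    let d2 := d1.insert b (PySem.Set.add s a)
    let adj := ([b - 1, b, b + 1]).foldl (fun acc b2 =>
        if d2.contains b2 && PySem.Set.contains (d2.getD b2 PySem.Set.empty) (3 - a) then acc + 1 else acc) st.2.1
    (d2, adj, st.2.2 ++ [if adj == 0 then "YES" else "NO"])

def process (A : List (Int × Int)) (n : Int) : List String :=
  (A.foldl processStep (PySem.Dict.empty, 0, [])).2.2

-- ===== PORT B =====
-- bad = any((3 - a2, c) in occ for (a2, b2) in occ for c in (b2-1, b2, b2+1))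
-- (an existence test over a set: order-independent, so List.any over the Set's list is exact)
def altBad (occ : PySem.Set (Int × Int)) : Bool :=
  occ.any (fun p => ([p.2 - 1, p.2, p.2 + 1]).any (fun c => PySem.Set.contains occ (3 - p.1, c)))

def altStep (st : PySem.Set (Int × Int) × List String) (ab : Int × Int) :
    PySem.Set (Int × Int) × List String :=
  let occ := if PySem.Set.contains st.1 ab then PySem.Set.discard st.1 ab else PySem.Set.add st.1 ab
  (occ, st.2 ++ [if altBad occ then "NO" else "YES"])

def process_alt (A : List (Int × Int)) (n : Int) : List String :=
  (A.foldl altStep (PySem.Set.empty, [])).2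

-- ===== PRECONDITION & SPEC =====
def Spec_process (A : List (Int × Int)) (n : Int) (out : List String) : Prop := out = process_alt A n
instance (A : List (Int × Int)) (n : Int) (out : List String) : Decidable (Spec_process A n out) := by unfold Spec_process; infer_instance

-- ===== CLAIM (what is proved, stated in full; the proofs are below) =====
def Claim_equal_process : Prop := ∀ (A : List (Int × Int)) (n : Int), Dom_process A n → Spec_process A n (process A n)

-- ===== LEMMAS AND PROOFS =====

def pvInd (s : Finset (Int × Int)) (q : Int × Int) : Int := if q ∈ s then 1 else 0
def pvK (s : Finset (Int × Int)) (p : Int × Int) : Int :=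
  pvInd s (3 - p.1, p.2 - 1) + pvInd s (3 - p.1, p.2) + pvInd s (3 - p.1, p.2 + 1)
def pvW (s : Finset (Int × Int)) (p : Int × Int) : Int :=
  if 2 * p.1 < 3 then pvK s p else 0
def pvN (s : Finset (Int × Int)) : Int := s.sum (pvW s)
def pvBad (s : Finset (Int × Int)) : Prop :=
  ∃ p ∈ s, ∃ c, (c = p.2 - 1 ∨ c = p.2 ∨ c = p.2 + 1) ∧ (3 - p.1, c) ∈ s

lemma pvInd_nonneg (s : Finset (Int × Int)) (q : Int × Int) : 0 ≤ pvInd s q := by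
  unfold pvInd; split <;> omega

lemma pvW_nonneg (s : Finset (Int × Int)) (p : Int × Int) : 0 ≤ pvW s p := by
  unfold pvW pvK
  have h1 := pvInd_nonneg s (3 - p.1, p.2 - 1)
  have h2 := pvInd_nonneg s (3 - p.1, p.2)
  have h3 := pvInd_nonneg s (3 - p.1, p.2 + 1)
  split <;> omega

lemma pvInd_insert (s : Finset (Int × Int)) (x q : Int × Int) (hx : x ∉ s) :
    pvInd (insert x s) q = pvInd s q + (if q = x then 1 else 0) := by
  unfold pvInd
  by_cases h : q = x
  · subst h; simp [hx]
  · simp [Finset.mem_insert, h]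

lemma pvInd_insert_of_ne (s : Finset (Int × Int)) (x q : Int × Int) (h : q ≠ x) :
    pvInd (insert x s) q = pvInd s q := by
  unfold pvInd; simp [Finset.mem_insert, h]

lemma pvSum_ite_and (s : Finset (Int × Int)) (r : Int × Int) (C : Prop) [Decidable C] :
    (∑ p ∈ s, if p = r ∧ C then (1:Int) else 0) = if r ∈ s ∧ C then 1 else 0 := by
  by_cases hC : C
  · simp only [hC, and_true]
    exact Finset.sum_ite_eq' s r (fun _ => (1:Int))
  · simp [hC]

lemma pvN_insert (s : Finset (Int × Int)) (x : Int × Int) (hx : x ∉ s) :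
    pvN (insert x s) = pvN s + pvK s x := by
  obtain ⟨x1, x2⟩ := x
  have hne : ∀ c : Int, (3 - x1, c) ≠ (x1, x2) := by
    intro c h
    have h1 := congrArg Prod.fst h
    simp at h1; omega
  unfold pvN
  rw [Finset.sum_insert hx]
  have hwx : pvW (insert (x1, x2) s) (x1, x2) = pvW s (x1, x2) := by
    unfold pvW pvK
    simp only [pvInd_insert_of_ne s (x1, x2) _ (hne _)]
  rw [hwx]
  have hsum : ∀ p ∈ s, pvW (insert (x1, x2) s) p = pvW s p +
      ((if p = (3 - x1, x2 + 1) ∧ 3 < 2 * x1 then (1:Int) else 0) +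
       (if p = (3 - x1, x2) ∧ 3 < 2 * x1 then (1:Int) else 0) +
       (if p = (3 - x1, x2 - 1) ∧ 3 < 2 * x1 then (1:Int) else 0)) := by
    intro p _
    obtain ⟨p1, p2⟩ := p
    unfold pvW pvK
    simp only [pvInd_insert s (x1, x2) _ hx, Prod.ext_iff]
    split_ifs <;> omega
  rw [Finset.sum_congr rfl hsum, Finset.sum_add_distrib, Finset.sum_add_distrib, Finset.sum_add_distrib]
  rw [pvSum_ite_and s _ _, pvSum_ite_and s _ _, pvSum_ite_and s _ _]
  by_cases hx1 : 3 < 2 * x1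
  · have hlow : ¬ (2 * x1 < 3) := by omega
    unfold pvW pvK pvInd
    simp only [hx1, and_true, hlow, if_false]
    split_ifs <;> ring
  · have hlow : 2 * x1 < 3 := by omega
    unfold pvW pvK pvInd
    simp only [hx1, and_false, if_false, if_pos hlow]
    ring

lemma pvBad_iff_low (s : Finset (Int × Int)) :
    pvBad s ↔ ∃ p ∈ s, 2 * p.1 < 3 ∧ pvK s p ≠ 0 := by
  have hKpos : ∀ p : Int × Int, pvK s p ≠ 0 ↔
      ((3 - p.1, p.2 - 1) ∈ s ∨ (3 - p.1, p.2) ∈ s ∨ (3 - p.1, p.2 + 1) ∈ s) := by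
    intro p; unfold pvK pvInd; split_ifs <;> simp_all
  constructor
  · rintro ⟨⟨p1, p2⟩, hp, c, hc, hmem⟩
    by_cases hlow : 2 * p1 < 3
    · refine ⟨(p1, p2), hp, hlow, ?_⟩
      rw [hKpos]; simp only
      rcases hc with h | h | h <;> subst h
      · exact Or.inl hmem
      · exact Or.inr (Or.inl hmem)
      · exact Or.inr (Or.inr hmem)
    · refine ⟨(3 - p1, c), hmem, by simp; omega, ?_⟩
      rw [hKpos]; simp only
      have h3 : (3 : Int) - (3 - p1) = p1 := by omega
      rw [h3]
      rcases hc with h | h | h <;> subst h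
      · right; right; have : p2 - 1 + 1 = p2 := by omega
        rw [this]; exact hp
      · right; left; exact hp
      · left; have : p2 + 1 - 1 = p2 := by omega
        rw [this]; exact hp
  · rintro ⟨⟨p1, p2⟩, hp, hlow, hk⟩
    rw [hKpos] at hk
    rcases hk with h | h | h
    · exact ⟨(p1, p2), hp, p2 - 1, Or.inl rfl, h⟩
    · exact ⟨(p1, p2), hp, p2, Or.inr (Or.inl rfl), h⟩
    · exact ⟨(p1, p2), hp, p2 + 1, Or.inr (Or.inr rfl), h⟩

lemma pvN_zero_iff (s : Finset (Int × Int)) : pvN s = 0 ↔ ¬ pvBad s := by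
  rw [pvN, Finset.sum_eq_zero_iff_of_nonneg (fun p _ => pvW_nonneg s p), pvBad_iff_low]
  constructor
  · intro h ⟨p, hp, hlow, hk⟩
    have := h p hp
    unfold pvW at this
    rw [if_pos hlow] at this
    exact hk this
  · intro h p hp
    unfold pvW
    split_ifs with hlow
    · by_contra hk
      exact h ⟨p, hp, hlow, hk⟩
    · rfl
def pvMinv (d : PySem.Dict Int (PySem.Set Int)) (occ : PySem.Set (Int × Int)) : Prop :=
  ∀ x y : Int, x ∈ (d.getD y PySem.Set.empty : List Int) ↔ (x, y) ∈ occ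

lemma pvMinv_setdefault (d : PySem.Dict Int (PySem.Set Int)) (occ : PySem.Set (Int × Int))
    (b : Int) (hm : pvMinv d occ) :
    pvMinv (if d.contains b then d else d.insert b PySem.Set.empty) occ := by
  split_ifs with h
  · exact hm
  · intro x y
    rw [PySem.Dict.getD_insert]
    split_ifs with hy
    · subst hy
      simp only [PySem.Set.empty, List.not_mem_nil, false_iff]
      intro hx
      have := (hm x y).2 hx
      have hcf : d.contains y = false := by simpa using h
      rw [PySem.Dict.getD_of_not_contains _ _ hcf] at this
      simp [PySem.Set.empty] at this
    · exact hm x y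

lemma pvMinv_remove (d : PySem.Dict Int (PySem.Set Int)) (occ : PySem.Set (Int × Int))
    (a b : Int) (hm : pvMinv d occ) :
    pvMinv (d.insert b (PySem.Set.discard (d.getD b PySem.Set.empty) a))
      (PySem.Set.discard occ (a, b)) := by
  intro x y
  rw [PySem.Dict.getD_insert]
  split_ifs with hy
  · subst hy
    rw [PySem.Set.mem_discard, PySem.Set.mem_discard, hm x y]
    constructor
    · rintro ⟨h1, h2⟩
      exact ⟨h1, fun he => h2 (congrArg Prod.fst he)⟩
    · rintro ⟨h1, h2⟩
      exact ⟨h1, fun he => h2 (by rw [he])⟩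
  · rw [PySem.Set.mem_discard, hm x y]
    constructor
    · intro h1; exact ⟨h1, fun he => hy (congrArg Prod.snd he)⟩
    · rintro ⟨h1, _⟩; exact h1

lemma pvMinv_add (d : PySem.Dict Int (PySem.Set Int)) (occ : PySem.Set (Int × Int))
    (a b : Int) (hm : pvMinv d occ) :
    pvMinv (d.insert b (PySem.Set.add (d.getD b PySem.Set.empty) a))
      (PySem.Set.add occ (a, b)) := by
  intro x y
  rw [PySem.Dict.getD_insert]
  split_ifs with hy
  · subst hy
    rw [PySem.Set.mem_add, PySem.Set.mem_add, hm x y]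
    constructor
    · rintro (h1 | h1)
      · exact Or.inl h1
      · exact Or.inr (by rw [h1])
    · rintro (h1 | h1)
      · exact Or.inl h1
      · exact Or.inr (congrArg Prod.fst h1)
  · rw [PySem.Set.mem_add, hm x y]
    constructor
    · intro h1; exact Or.inl h1
    · rintro (h1 | h1)
      · exact h1
      · exact absurd (congrArg Prod.snd h1) hy

lemma pvToFinset_discard (occ : PySem.Set (Int × Int)) (p : Int × Int) :
    (PySem.Set.discard occ p).toFinset = occ.toFinset.erase p := by
  ext q
  simp [PySem.Set.mem_discard, Finset.mem_erase, and_comm]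

lemma pvToFinset_add (occ : PySem.Set (Int × Int)) (p : Int × Int) (h : p ∉ occ) :
    (PySem.Set.add occ p).toFinset = insert p occ.toFinset := by
  rw [PySem.Set.add_of_not_mem h]
  ext q
  simp

lemma pvCond (d : PySem.Dict Int (PySem.Set Int)) (occ : PySem.Set (Int × Int))
    (hm : pvMinv d occ) (x c : Int) :
    (d.contains c && PySem.Set.contains (d.getD c PySem.Set.empty) x)
      = decide ((x, c) ∈ occ.toFinset) := by
  rw [Bool.eq_iff_iff]
  simp only [decide_eq_true_eq, Bool.and_eq_true, PySem.Set.contains_iff, List.mem_toFinset]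
  constructor
  · rintro ⟨_, h2⟩; exact (hm x c).1 h2
  · intro h2
    refine ⟨?_, (hm x c).2 h2⟩
    by_contra hdc
    have h3 := (hm x c).2 h2
    have hcf : d.contains c = false := by simpa using hdc
    rw [PySem.Dict.getD_of_not_contains _ _ hcf] at h3
    simp [PySem.Set.empty] at h3

lemma pvFold_add (d : PySem.Dict Int (PySem.Set Int)) (occ : PySem.Set (Int × Int))
    (hm : pvMinv d occ) (a b adj : Int) :
    ([b - 1, b, b + 1]).foldl (fun acc b2 =>
        if d.contains b2 && PySem.Set.contains (d.getD b2 PySem.Set.empty) (3 - a)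
        then acc + 1 else acc) adj
      = adj + pvK occ.toFinset (a, b) := by
  simp only [List.foldl_cons, List.foldl_nil, pvCond d occ hm (3 - a), decide_eq_true_eq]
  unfold pvK pvInd
  split_ifs <;> omega

lemma pvFold_sub (d : PySem.Dict Int (PySem.Set Int)) (occ : PySem.Set (Int × Int))
    (hm : pvMinv d occ) (a b adj : Int) :
    ([b - 1, b, b + 1]).foldl (fun acc b2 =>
        if d.contains b2 && PySem.Set.contains (d.getD b2 PySem.Set.empty) (3 - a)
        then acc - 1 else acc) adj
      = adj - pvK occ.toFinset (a, b) := by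
  simp only [List.foldl_cons, List.foldl_nil, pvCond d occ hm (3 - a), decide_eq_true_eq]
  unfold pvK pvInd
  split_ifs <;> omega

lemma pvAltBad_iff (occ : PySem.Set (Int × Int)) : altBad occ = true ↔ pvBad occ.toFinset := by
  unfold altBad pvBad
  simp only [List.any_eq_true, PySem.Set.contains_iff, List.mem_toFinset, List.mem_cons,
    List.not_mem_nil, or_false]

lemma pvAns (adj : Int) (occ : PySem.Set (Int × Int)) (h : adj = pvN occ.toFinset) :
    (if adj == 0 then "YES" else "NO") = (if altBad occ then "NO" else "YES") := by
  by_cases hb : altBad occ = true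
  · have hne : ¬ (adj = 0) := by
      rw [h, pvN_zero_iff]
      intro hnb
      exact hnb ((pvAltBad_iff occ).1 hb)
    simp [hb, beq_iff_eq, hne]
  · have hnb : ¬ pvBad occ.toFinset := fun hB => hb ((pvAltBad_iff occ).2 hB)
    have h0 : adj = 0 := by rw [h, pvN_zero_iff]; exact hnb
    rw [Bool.not_eq_true] at hb
    simp [hb, h0]

def pvInv (sA : PySem.Dict Int (PySem.Set Int) × Int × List String)
    (sB : PySem.Set (Int × Int) × List String) : Prop :=
  sA.2.2 = sB.2 ∧ pvMinv sA.1 sB.1 ∧ sB.1.Nodup ∧ sA.2.1 = pvN sB.1.toFinset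

lemma pvInv_step (sA : PySem.Dict Int (PySem.Set Int) × Int × List String)
    (sB : PySem.Set (Int × Int) × List String) (ab : Int × Int) (h : pvInv sA sB) :
    pvInv (processStep sA ab) (altStep sB ab) := by
  obtain ⟨d0, adj, ans⟩ := sA
  obtain ⟨occ, ansB⟩ := sB
  obtain ⟨hans, hm, hnd, hadj⟩ := h
  obtain ⟨a, b⟩ := ab
  simp only at hans hm hnd hadj
  unfold processStep altStep
  simp only
  have hm1 : pvMinv (if d0.contains b then d0 else d0.insert b PySem.Set.empty) occ :=
    pvMinv_setdefault d0 occ b hm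
  set d1 := if d0.contains b then d0 else d0.insert b PySem.Set.empty with hd1
  by_cases hmem : (a, b) ∈ occ
  · have hcontA : PySem.Set.contains (d1.getD b PySem.Set.empty) a = true := by
      rw [PySem.Set.contains_iff, hm1 a b]; exact hmem
    have hcontB : PySem.Set.contains occ (a, b) = true := by
      rw [PySem.Set.contains_iff]; exact hmem
    rw [if_pos hcontA, if_pos hcontB]
    have hm2 : pvMinv (d1.insert b (PySem.Set.discard (d1.getD b PySem.Set.empty) a))
        (PySem.Set.discard occ (a, b)) := pvMinv_remove d1 occ a b hm1
    have hnd2 : (PySem.Set.discard occ (a, b)).Nodup := PySem.Set.nodup_discard _ _ hnd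
    have hTF : (PySem.Set.discard occ (a, b)).toFinset = occ.toFinset.erase (a, b) :=
      pvToFinset_discard occ (a, b)
    have hmemF : (a, b) ∈ occ.toFinset := List.mem_toFinset.2 hmem
    have hNi := pvN_insert (occ.toFinset.erase (a, b)) (a, b) (Finset.notMem_erase _ _)
    rw [Finset.insert_erase hmemF] at hNi
    have hfold := pvFold_sub _ (PySem.Set.discard occ (a, b)) hm2 a b adj
    have hval : adj - pvK (PySem.Set.discard occ (a, b)).toFinset (a, b)
        = pvN (PySem.Set.discard occ (a, b)).toFinset := by
      rw [hTF]
      linarith [hadj, hNi]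
    refine ⟨?_, hm2, hnd2, ?_⟩
    · rw [hans, hfold, pvAns _ _ hval]
    · rw [hfold]
      exact hval
  · have hcontA : ¬ (PySem.Set.contains (d1.getD b PySem.Set.empty) a = true) := by
      rw [PySem.Set.contains_iff, hm1 a b]; exact hmem
    have hcontB : ¬ (PySem.Set.contains occ (a, b) = true) := by
      rw [PySem.Set.contains_iff]; exact hmem
    rw [if_neg hcontA, if_neg hcontB]
    have hm2 : pvMinv (d1.insert b (PySem.Set.add (d1.getD b PySem.Set.empty) a))
        (PySem.Set.add occ (a, b)) := pvMinv_add d1 occ a b hm1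
    have hnd2 : (PySem.Set.add occ (a, b)).Nodup := PySem.Set.nodup_add _ _ hnd
    have hTF : (PySem.Set.add occ (a, b)).toFinset = insert (a, b) occ.toFinset :=
      pvToFinset_add occ (a, b) hmem
    have hmemF : (a, b) ∉ occ.toFinset := fun hc => hmem (List.mem_toFinset.1 hc)
    have hNi := pvN_insert occ.toFinset (a, b) hmemF
    have hKeq : pvK (insert (a, b) occ.toFinset) (a, b) = pvK occ.toFinset (a, b) := by
      unfold pvK
      have hne : ∀ c : Int, ((3 : Int) - a, c) ≠ (a, b) := by
        intro c hc
        have h1 := congrArg Prod.fst hc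
        simp at h1
        omega
      simp only [pvInd_insert_of_ne occ.toFinset (a, b) _ (hne _)]
    have hfold := pvFold_add _ (PySem.Set.add occ (a, b)) hm2 a b adj
    have hval : adj + pvK (PySem.Set.add occ (a, b)).toFinset (a, b)
        = pvN (PySem.Set.add occ (a, b)).toFinset := by
      rw [hTF, hKeq]
      linarith [hadj, hNi]
    refine ⟨?_, hm2, hnd2, ?_⟩
    · rw [hans, hfold, pvAns _ _ hval]
    · rw [hfold]
      exact hval

lemma pvInv_foldl (A : List (Int × Int)) (sA : PySem.Dict Int (PySem.Set Int) × Int × List String)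
    (sB : PySem.Set (Int × Int) × List String) (h : pvInv sA sB) :
    pvInv (A.foldl processStep sA) (A.foldl altStep sB) := by
  induction A generalizing sA sB with
  | nil => exact h
  | cons ab t ih => exact ih _ _ (pvInv_step _ _ _ h)

-- ===== VERDICT (by name: the statement is the Claim_ definition above) =====
theorem process_spec : Claim_equal_process := by
  intro A n _
  have h0 : pvInv (PySem.Dict.empty, 0, []) (PySem.Set.empty, []) := by
    refine ⟨rfl, ?_, List.nodup_nil, ?_⟩
    · intro x y
      simp [PySem.Dict.getD_empty, PySem.Set.empty]
    · simp [pvN, PySem.Set.empty]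
  have hmain := pvInv_foldl A _ _ h0
  unfold Spec_process process process_alt
  exact hmain.1
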